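-- pv_equiv track=rewrite | github.com/Wlodarz03/UWR | Sztuczna/Lista2/zad1.py | if_line_match
-- ===== SOURCE A (Python) =====
-- def if_line_match(line, target):
--     count = 0
--     blocks = []
--     for i in range(len(line)):
--         if line[i] == 1:
--             count += 1
--         else:
--             if count != 0:
--                 blocks.append(count)
--             count = 0
--     if count != 0:
--         blocks.append(count)
--     return blocks == target
-- ===== SOURCE B (Python) =====
-- def if_line_match(line, target):
--     cuts = [-1] + [i for i, x in enumerate(line) if x != 1] + [len(line)]
--     blocks = [b - a - 1 for a, b in zip(cuts, cuts[1:]) if b - a > 1]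
--     return blocks == target
-- ===== Notes on version B (the rewrite author's own statement) =====
-- stated objective: alternative
-- what changed: B never maintains a running count: it first collects the positions of all non-1 separators (with -1 and len(line) as sentinels), then derives each block length by index arithmetic as the gap b-a-1 between consecutive separator positions, keeping positive gaps; A instead scans with a count accumulator flushed at each separator and at the end.
import Mathlib
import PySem

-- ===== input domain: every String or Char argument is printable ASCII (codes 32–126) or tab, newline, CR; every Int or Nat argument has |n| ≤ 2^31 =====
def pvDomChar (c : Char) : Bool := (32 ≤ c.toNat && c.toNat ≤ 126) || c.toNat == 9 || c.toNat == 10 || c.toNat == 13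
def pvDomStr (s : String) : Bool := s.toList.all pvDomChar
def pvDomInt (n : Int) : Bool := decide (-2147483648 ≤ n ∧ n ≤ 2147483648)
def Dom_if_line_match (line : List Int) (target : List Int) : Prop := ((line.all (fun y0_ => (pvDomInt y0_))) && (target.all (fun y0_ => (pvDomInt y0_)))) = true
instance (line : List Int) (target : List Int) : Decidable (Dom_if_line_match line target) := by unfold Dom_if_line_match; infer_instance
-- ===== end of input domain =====

-- B replaces A's running count-and-flush accumulator by separator-position arithmetic:
-- collect the indices of all non-1 elements (with sentinels -1 and len(line)), and read each
-- block length off as the gap between consecutive separator positions; same cost, no running state.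

-- ===== PORT A =====
-- literal port: index loop over range(len(line)) with state (count, blocks), trailing flush
def if_line_match (line : List Int) (target : List Int) : Bool :=
  let st := (PySem.List.pyRange 0 (line.length : Int) 1).foldl
    (fun (s : Int × List Int) i =>
      if PySem.List.pyGetD line i 0 = 1 then (s.1 + 1, s.2)
      else if s.1 ≠ 0 then ((0 : Int), s.2 ++ [s.1]) else ((0 : Int), s.2))
    ((0 : Int), ([] : List Int))
  let blocks := if st.1 ≠ 0 then st.2 ++ [st.1] else st.2
  blocks == target

-- ===== PORT B =====
-- literal port of Source B: sentinel-framed list of separator indices, then gaps between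
-- consecutive cut positions (zip cuts cuts[1:]), keeping the positive gaps b - a - 1
def if_line_match_alt (line : List Int) (target : List Int) : Bool :=
  let cuts := [(-1 : Int)] ++ ((PySem.List.enumerate line 0).filter (fun p => p.2 != 1)).map (fun p => p.1) ++ [(line.length : Int)]
  let blocks := ((cuts.zip (cuts.drop 1)).filter (fun p => p.2 - p.1 > 1)).map (fun p => p.2 - p.1 - 1)
  blocks == target

-- ===== PRECONDITION & SPEC =====
def Spec_if_line_match (line : List Int) (target : List Int) (out : Bool) : Prop := out = if_line_match_alt line target
instance (line : List Int) (target : List Int) (out : Bool) : Decidable (Spec_if_line_match line target out) := by unfold Spec_if_line_match; infer_instance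

-- ===== CLAIM (what is proved, stated in full; the proofs are below) =====
def Claim_equal_if_line_match : Prop := ∀ (line : List Int) (target : List Int), Dom_if_line_match line target → Spec_if_line_match line target (if_line_match line target)

-- ===== LEMMAS AND PROOFS =====

-- canonical description of the run-lengths-of-1s, used as the meeting point of both ports
def runsA (c : Int) : List Int → List Int
  | [] => if c ≠ 0 then [c] else []
  | x :: xs => if x = 1 then runsA (c + 1) xs
               else if c ≠ 0 then c :: runsA 0 xs else runsA 0 xs

lemma flush_foldl (l : List Int) : ∀ (c : Int) (bs : List Int),
    (fun st : Int × List Int => if st.1 ≠ 0 then st.2 ++ [st.1] else st.2)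
      (l.foldl (fun (s : Int × List Int) x =>
        if x = 1 then (s.1 + 1, s.2)
        else if s.1 ≠ 0 then ((0 : Int), s.2 ++ [s.1]) else ((0 : Int), s.2)) (c, bs))
      = bs ++ runsA c l := by
  induction l with
  | nil => intro c bs; simp only [List.foldl_nil, runsA]; split_ifs <;> simp
  | cons x xs ih =>
    intro c bs
    by_cases hx : x = 1
    · rw [List.foldl_cons, if_pos hx]
      rw [show runsA c (x :: xs) = runsA (c + 1) xs from by simp [runsA, hx]]
      exact ih (c + 1) bs
    · by_cases hc : c ≠ 0
      · rw [List.foldl_cons, if_neg hx, if_pos hc]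
        rw [show runsA c (x :: xs) = c :: runsA 0 xs from by simp [runsA, hx, hc]]
        exact (ih 0 (bs ++ [c])).trans (by simp)
      · have hc0 : c = 0 := by omega
        subst hc0
        rw [List.foldl_cons, if_neg hx, if_neg hc]
        rw [show runsA 0 (x :: xs) = runsA 0 xs from by simp [runsA, hx]]
        exact ih 0 bs

-- separator positions of l, first element at absolute index n
def cutsOf (n : Int) : List Int → List Int
  | [] => []
  | x :: xs => if x ≠ 1 then n :: cutsOf (n + 1) xs else cutsOf (n + 1) xs

lemma enum_filter_eq_cutsOf : ∀ (l : List Int) (n : Int),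
    ((PySem.List.enumerate l n).filter (fun p => p.2 != 1)).map (fun p => p.1) = cutsOf n l := by
  intro l
  induction l with
  | nil => intro n; simp [PySem.List.enumerate_nil, cutsOf]
  | cons x xs ih =>
    intro n
    rw [PySem.List.enumerate_cons]
    by_cases hx : x = 1
    · simp [cutsOf, hx, ih]
    · simp [cutsOf, hx, ih]

-- gap extraction from a cut list
def pb (xs : List Int) : List Int :=
  ((xs.zip (xs.drop 1)).filter (fun p => p.2 - p.1 > 1)).map (fun p => p.2 - p.1 - 1)

lemma pb_cons2 (a b : Int) (rest : List Int) :
    pb (a :: b :: rest) = (if b - a > 1 then [b - a - 1] else []) ++ pb (b :: rest) := by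
  by_cases h : b - a > 1 <;> simp [pb, h]

lemma pb_cuts : ∀ (l : List Int) (n p : Int), p < n →
    pb (p :: (cutsOf n l ++ [n + l.length])) = runsA (n - p - 1) l := by
  intro l
  induction l with
  | nil =>
    intro n p hp
    simp only [cutsOf, List.length_nil, Int.natCast_zero, add_zero, List.nil_append, runsA]
    rw [show (p :: [n]) = p :: n :: ([] : List Int) from rfl, pb_cons2]
    have hpb : pb [n] = [] := by simp [pb]
    rw [hpb]
    split_ifs with h1 h2 h2 <;> first | rfl | omega
  | cons x xs ih =>
    intro n p hp
    by_cases hx : x = 1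
    · have hc : cutsOf n (x :: xs) = cutsOf (n + 1) xs := by simp [cutsOf, hx]
      have hlen : n + ((x :: xs).length : Int) = (n + 1) + (xs.length : Int) := by
        simp; ring
      rw [hc, hlen, ih (n + 1) p (by omega)]
      have : runsA (n - p - 1) (x :: xs) = runsA (n - p - 1 + 1) xs := by simp [runsA, hx]
      rw [this]
      congr 1
      ring
    · have hc : cutsOf n (x :: xs) = n :: cutsOf (n + 1) xs := by simp [cutsOf, hx]
      have hlen : n + ((x :: xs).length : Int) = (n + 1) + (xs.length : Int) := by
        simp; ring
      rw [hc, List.cons_append, hlen, pb_cons2, ih (n + 1) n (by omega)]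
      have hr : runsA (n - p - 1) (x :: xs)
          = if n - p - 1 ≠ 0 then (n - p - 1) :: runsA 0 xs else runsA 0 xs := by
        simp [runsA, hx]
      rw [hr, show (n + 1) - n - 1 = (0 : Int) from by ring]
      split_ifs with h1 h2 h2 <;> first | omega | simp

-- ===== VERDICT (by name: the statement is the Claim_ definition above) =====
theorem if_line_match_spec : Claim_equal_if_line_match := by
  intro line target _
  unfold Spec_if_line_match
  simp only [if_line_match, if_line_match_alt]
  rw [PySem.List.foldl_pyRange_zero_pyGetD' line 0
    (fun (s : Int × List Int) x =>
      if x = 1 then (s.1 + 1, s.2)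
      else if s.1 ≠ 0 then ((0 : Int), s.2 ++ [s.1]) else ((0 : Int), s.2)) ((0:Int), ([] : List Int))]
  have hA := flush_foldl line 0 []
  simp only at hA
  rw [hA]
  rw [enum_filter_eq_cutsOf line 0]
  have hB := pb_cuts line 0 (-1) (by omega)
  simp only [zero_add, show (0 : Int) - (-1) - 1 = 0 from by ring] at hB
  have : pb ([(-1 : Int)] ++ (cutsOf 0 line ++ [(line.length : Int)]))
      = runsA 0 line := by simpa using hB
  simp only [pb] at this
  simp only [List.append_assoc, this]
  simp
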